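-- pv_equiv track=rewrite | github.com/BalaShankar9/SecProbe | secprobe/scanners/idor_scanner.py | _is_error_page
-- ===== SOURCE A (Python) =====
-- def _is_error_page(html):
--     """Check if response is a generic error page."""
--     error_indicators = [
--         "404 not found", "page not found", "not exist",
--         "error 404", "access denied", "forbidden",
--         "unauthorized", "login required",
--     ]
--     html_lower = html.lower()
--     return any(indicator in html_lower for indicator in error_indicators)
-- ===== SOURCE B (Python) =====
-- _INDICATORS = (
--     "404 not found", "page not found", "not exist",
--     "error 404", "access denied", "forbidden",
--     "unauthorized", "login required",
-- )
--
-- def _is_error_page(html):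
--     """Single left-to-right scan: at each position, test whether any
--     indicator starts there, instead of eight separate substring searches."""
--     h = html.lower()
--     for i in range(len(h) + 1):
--         for ind in _INDICATORS:
--             if h.startswith(ind, i):
--                 return True
--     return False
-- ===== Notes on version B (the rewrite author's own statement) =====
-- stated objective: alternative
-- what changed: Replaces eight independent substring searches over the lowercased text with a single left-to-right scan that tests all eight indicators as prefixes at each position.
import Mathlib
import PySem

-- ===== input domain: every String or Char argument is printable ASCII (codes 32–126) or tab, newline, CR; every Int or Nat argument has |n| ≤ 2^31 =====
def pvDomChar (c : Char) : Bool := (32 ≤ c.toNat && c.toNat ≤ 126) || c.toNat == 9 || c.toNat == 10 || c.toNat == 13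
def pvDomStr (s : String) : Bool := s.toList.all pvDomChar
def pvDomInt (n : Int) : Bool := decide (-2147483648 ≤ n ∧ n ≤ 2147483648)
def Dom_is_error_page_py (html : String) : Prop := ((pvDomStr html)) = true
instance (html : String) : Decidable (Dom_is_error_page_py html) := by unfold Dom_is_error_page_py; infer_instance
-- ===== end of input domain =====

-- B replaces eight independent substring searches with one left-to-right scan
-- testing all indicators as prefixes at each position (alternative; no speed claim).


-- ===== PORT A =====
def pvErrorIndicators : List String :=
  ["404 not found", "page not found", "not exist",
   "error 404", "access denied", "forbidden",
   "unauthorized", "login required"]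

def is_error_page_py (html : String) : Bool :=
  let html_lower := PySem.Str.lower html
  pvErrorIndicators.any (fun indicator => PySem.Str.isIn indicator html_lower)

-- ===== PORT B =====
def pvIndChars : List (List Char) :=
  ["404 not found".toList, "page not found".toList, "not exist".toList,
   "error 404".toList, "access denied".toList, "forbidden".toList,
   "unauthorized".toList, "login required".toList]

-- the scan loop of Source B: positions i = 0 .. len, i.e. all suffixes of h
def pvScan : List Char → Bool
  | [] => pvIndChars.any (fun ind => PySem.Chars.startswith [] ind)
  | c :: rest =>
      if pvIndChars.any (fun ind => PySem.Chars.startswith (c :: rest) ind) then true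
      else pvScan rest

def is_error_page_py_alt (html : String) : Bool :=
  pvScan (PySem.Str.lower html).toList

-- ===== PRECONDITION & SPEC =====
def Spec_is_error_page_py (html : String) (out : Bool) : Prop := out = is_error_page_py_alt html
instance (html : String) (out : Bool) : Decidable (Spec_is_error_page_py html out) := by unfold Spec_is_error_page_py; infer_instance

-- ===== CLAIM (what is proved, stated in full; the proofs are below) =====
def Claim_equal_is_error_page_py : Prop := ∀ (html : String), Dom_is_error_page_py html → Spec_is_error_page_py html (is_error_page_py html)

-- ===== LEMMAS AND PROOFS =====
theorem pvScan_iff (l : List Char) :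
    pvScan l = true ↔ ∃ p ∈ pvIndChars, p <:+: l := by
  induction l with
  | nil =>
      simp only [pvScan, List.any_eq_true, PySem.Chars.startswith_iff]
      constructor
      · rintro ⟨p, hp, h⟩; exact ⟨p, hp, h.isInfix⟩
      · rintro ⟨p, hp, h⟩; exact ⟨p, hp, (List.infix_nil.mp h) ▸ List.prefix_rfl⟩
  | cons c rest ih =>
      simp only [pvScan]
      split_ifs with h
      · simp only [List.any_eq_true, PySem.Chars.startswith_iff] at h
        obtain ⟨p, hp, hpre⟩ := h
        exact iff_of_true rfl ⟨p, hp, hpre.isInfix⟩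
      · simp only [List.any_eq_true, PySem.Chars.startswith_iff] at h
        push Not at h
        rw [ih]
        constructor
        · rintro ⟨p, hp, hi⟩; exact ⟨p, hp, hi.trans (List.suffix_cons c rest).isInfix⟩
        · rintro ⟨p, hp, hi⟩
          rcases List.infix_cons_iff.mp hi with hpre | hi'
          · exact absurd hpre (h p hp)
          · exact ⟨p, hp, hi'⟩

theorem pvInds_map : pvIndChars = pvErrorIndicators.map String.toList := by rfl

theorem is_error_page_py_spec : Claim_equal_is_error_page_py := by
  intro html _
  unfold Spec_is_error_page_py
  have hA : is_error_page_py html = true ↔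
      ∃ p ∈ pvIndChars, p <:+: (PySem.Str.lower html).toList := by
    simp only [is_error_page_py, List.any_eq_true, PySem.Str.isIn_iff_infix, pvInds_map,
      List.mem_map]
    constructor
    · rintro ⟨s, hs, h⟩; exact ⟨s.toList, ⟨s, hs, rfl⟩, h⟩
    · rintro ⟨p, ⟨s, hs, rfl⟩, h⟩; exact ⟨s, hs, h⟩
  have hB := pvScan_iff (PySem.Str.lower html).toList
  have : is_error_page_py html = true ↔ is_error_page_py_alt html = true := by
    rw [hA, is_error_page_py_alt, hB]
  exact Bool.eq_iff_iff.mpr this
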